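-- pv_equiv track=rewrite | github.com/ori-halevi/Python-exercises | ex5/build_alternating_list.py | build_alternating_list
-- ===== SOURCE A (Python) =====
-- def build_alternating_list(a, b):
--     new_lst = []
--     for i in range(len(a)):
--         if i % 2:
--             new_lst.append(a[i] + b[i])
--         else:
--             new_lst.append(a[i] * b[i])
--     return new_lst
-- ===== SOURCE B (Python) =====
-- def build_alternating_list(a, b):
--     n = len(a)
--     result = [0] * n
--     result[0::2] = [a[i] * b[i] for i in range(0, n, 2)]
--     result[1::2] = [a[i] + b[i] for i in range(1, n, 2)]
--     return result
-- ===== Notes on version B (the rewrite author's own statement) =====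
-- stated objective: alternative
-- what changed: Replaces the single per-element parity-branched loop by two strided passes: even slots are filled with products and odd slots with sums via extended-slice assignment into a preallocated list, removing the per-element branch.
import Mathlib
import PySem

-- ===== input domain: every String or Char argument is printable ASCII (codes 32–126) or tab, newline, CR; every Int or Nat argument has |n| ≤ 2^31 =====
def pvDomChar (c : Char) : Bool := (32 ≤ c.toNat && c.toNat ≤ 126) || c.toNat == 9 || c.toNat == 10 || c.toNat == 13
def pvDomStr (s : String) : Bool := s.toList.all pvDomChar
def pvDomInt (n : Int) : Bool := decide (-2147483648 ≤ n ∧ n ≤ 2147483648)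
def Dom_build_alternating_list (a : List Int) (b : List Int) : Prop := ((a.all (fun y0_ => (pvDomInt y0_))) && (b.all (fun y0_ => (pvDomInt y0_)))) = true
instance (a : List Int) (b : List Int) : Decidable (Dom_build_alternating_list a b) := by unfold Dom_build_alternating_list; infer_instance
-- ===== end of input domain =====

-- B fills even and odd slots in two strided passes instead of A's parity-branched loop; alternative decomposition, same cost.

-- ===== PORT A =====
def build_alternating_list (a : List Int) (b : List Int) : List Int :=
  (PySem.List.pyRange 0 (a.length : Int) 1).foldl
    (fun new_lst i =>
      new_lst ++ [if PySem.Int.mod i 2 ≠ 0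
                  then PySem.List.pyGetD a i 0 + PySem.List.pyGetD b i 0
                  else PySem.List.pyGetD a i 0 * PySem.List.pyGetD b i 0]) []

-- ===== PORT B =====
-- extended-slice assignment result[0::2] = evens; result[1::2] = odds on result = [0]*n:
-- the result interleaves the two strided lists (evens has one element more when n is odd).
def pvInterleave : List Int → List Int → List Int
  | [], ys => ys
  | x :: xs, ys => x :: pvInterleave ys xs
termination_by xs ys => xs.length + ys.length
decreasing_by simp; omega

def build_alternating_list_alt (a : List Int) (b : List Int) : List Int :=
  pvInterleave
    ((PySem.List.pyRange 0 (a.length : Int) 2).map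
      (fun i => PySem.List.pyGetD a i 0 * PySem.List.pyGetD b i 0))
    ((PySem.List.pyRange 1 (a.length : Int) 2).map
      (fun i => PySem.List.pyGetD a i 0 + PySem.List.pyGetD b i 0))

-- ===== PRECONDITION & SPEC =====
-- Pre_ excludes b shorter than a, exactly where Python A (and B) raise IndexError on b[i].
def Pre_build_alternating_list (a : List Int) (b : List Int) : Prop := a.length ≤ b.length
instance (a : List Int) (b : List Int) : Decidable (Pre_build_alternating_list a b) := by unfold Pre_build_alternating_list; infer_instance
def pvWitness_build_alternating_list : List Int × List Int := ([1, 2, 3], [4, 5, 6])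

def Spec_build_alternating_list (a : List Int) (b : List Int) (out : List Int) : Prop := out = build_alternating_list_alt a b
instance (a : List Int) (b : List Int) (out : List Int) : Decidable (Spec_build_alternating_list a b out) := by unfold Spec_build_alternating_list; infer_instance

-- ===== CLAIM (what is proved, stated in full; the proofs are below) =====
def Claim_equal_build_alternating_list : Prop := ∀ (a : List Int) (b : List Int), Dom_build_alternating_list a b → Pre_build_alternating_list a b → Spec_build_alternating_list a b (build_alternating_list a b)

-- ===== LEMMAS AND PROOFS =====

lemma pvRange_two_nil {k n : Int} (h : n ≤ k) : PySem.List.pyRange k n 2 = [] := by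
  rw [PySem.List.pyRange_of_pos _ _ (by norm_num : (0:Int) < 2)]
  rw [if_neg (by omega)]
  simp

lemma pvRange_two_cons {k n : Int} (h : k < n) :
    PySem.List.pyRange k n 2 = k :: PySem.List.pyRange (k + 2) n 2 := by
  rw [PySem.List.pyRange_of_pos _ _ (by norm_num : (0:Int) < 2),
      PySem.List.pyRange_of_pos _ _ (by norm_num : (0:Int) < 2)]
  rw [if_pos h]
  by_cases h2 : k + 2 < n
  · rw [if_pos h2]
    have hc : ((n - k + 2 - 1) / 2).toNat = ((n - (k + 2) + 2 - 1) / 2).toNat + 1 := by omega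
    rw [hc, List.range_succ_eq_map, List.map_cons, List.map_map]
    congr 1
    · push_cast; ring
    · exact List.map_congr_left (fun j _ => by
        simp only [Function.comp_apply, Nat.succ_eq_add_one]; push_cast; ring)
  · rw [if_neg h2]
    have hc : ((n - k + 2 - 1) / 2).toNat = 1 := by omega
    rw [hc]
    simp

lemma pvInterleave_strides (f : Int → Int) :
    ∀ (m : Nat) (k n : Int), (n - k).toNat ≤ m →
      pvInterleave ((PySem.List.pyRange k n 2).map f) ((PySem.List.pyRange (k + 1) n 2).map f)
        = (PySem.List.pyRange k n 1).map f := by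
  intro m
  induction m with
  | zero =>
    intro k n hm
    have h : n ≤ k := by omega
    rw [pvRange_two_nil h, pvRange_two_nil (by omega), PySem.List.pyRange_one_eq_nil h]
    simp [pvInterleave]
  | succ m ih =>
    intro k n hm
    by_cases h : k < n
    · rw [pvRange_two_cons h, PySem.List.pyRange_one_cons h, List.map_cons, List.map_cons]
      rw [pvInterleave]
      have := ih (k + 1) n (by omega)
      rw [show k + 1 + 1 = k + 2 by ring] at this
      rw [this]
    · rw [pvRange_two_nil (by omega), pvRange_two_nil (by omega),
          PySem.List.pyRange_one_eq_nil (by omega)]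
      simp [pvInterleave]

-- even-index strides take the product branch, odd-index strides the sum branch
lemma pvMap_stride_branch (a b : List Int) :
    ((PySem.List.pyRange 0 (a.length : Int) 2).map
        (fun i => PySem.List.pyGetD a i 0 * PySem.List.pyGetD b i 0)
      = (PySem.List.pyRange 0 (a.length : Int) 2).map
        (fun i => if PySem.Int.mod i 2 ≠ 0
                  then PySem.List.pyGetD a i 0 + PySem.List.pyGetD b i 0
                  else PySem.List.pyGetD a i 0 * PySem.List.pyGetD b i 0))
    ∧ ((PySem.List.pyRange 1 (a.length : Int) 2).map
        (fun i => PySem.List.pyGetD a i 0 + PySem.List.pyGetD b i 0)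
      = (PySem.List.pyRange 1 (a.length : Int) 2).map
        (fun i => if PySem.Int.mod i 2 ≠ 0
                  then PySem.List.pyGetD a i 0 + PySem.List.pyGetD b i 0
                  else PySem.List.pyGetD a i 0 * PySem.List.pyGetD b i 0)) := by
  constructor
  · refine List.map_congr_left (fun i hi => ?_)
    have hd := ((PySem.List.mem_pyRange_iff_of_pos (by norm_num : (0:Int) < 2) i).mp hi).2.2
    have hmod : PySem.Int.mod i 2 = 0 := by
      rw [PySem.Int.mod_eq_emod_of_pos (by norm_num : (0:Int) < 2)]
      omega
    rw [if_neg (fun hne => hne hmod)]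
  · refine List.map_congr_left (fun i hi => ?_)
    have hd := ((PySem.List.mem_pyRange_iff_of_pos (by norm_num : (0:Int) < 2) i).mp hi).2.2
    have hmod : PySem.Int.mod i 2 ≠ 0 := by
      rw [PySem.Int.mod_eq_emod_of_pos (by norm_num : (0:Int) < 2)]
      omega
    rw [if_pos hmod]

-- ===== VERDICT (by name: the statement is the Claim_ definition above) =====
theorem build_alternating_list_spec : Claim_equal_build_alternating_list := by
  intro a b _ _
  unfold Spec_build_alternating_list build_alternating_list build_alternating_list_alt
  rw [PySem.List.foldl_append_singleton_eq_map, List.nil_append,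
      (pvMap_stride_branch a b).1, (pvMap_stride_branch a b).2]
  have h := pvInterleave_strides
    (fun i => if PySem.Int.mod i 2 ≠ 0
              then PySem.List.pyGetD a i 0 + PySem.List.pyGetD b i 0
              else PySem.List.pyGetD a i 0 * PySem.List.pyGetD b i 0)
    a.length 0 (a.length : Int) (by omega)
  rw [show (0:Int) + 1 = 1 by norm_num] at h
  exact h.symm
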